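-- pv_equiv track=rewrite | github.com/edt-yxz-zzd/txt_phone | txt/script/sudoku.py | u2len
-- ===== SOURCE A (Python) =====
-- def u2len(upper, radix):
-- 	assert upper >= 1
-- 	assert radix >= 2
-- 	i = 0
-- 	u = upper - 1
-- 	while u:
-- 		u //= radix
-- 		i += 1
-- 	assert radix**(i-1) < upper <= radix**i
-- 	return i
-- ===== SOURCE B (Python) =====
-- def u2len(upper, radix):
-- 	assert upper >= 1
-- 	assert radix >= 2
-- 	p = 1
-- 	i = 0
-- 	while p < upper:
-- 		p *= radix
-- 		i += 1
-- 	return i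
-- ===== Notes on version B (the rewrite author's own statement) =====
-- stated objective: alternative
-- what changed: B computes the same digit count by growing a power (p=1; while p<upper: p*=radix) instead of repeatedly floor-dividing upper-1 down to zero; it never computes upper-1 and never divides.
import Mathlib
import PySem

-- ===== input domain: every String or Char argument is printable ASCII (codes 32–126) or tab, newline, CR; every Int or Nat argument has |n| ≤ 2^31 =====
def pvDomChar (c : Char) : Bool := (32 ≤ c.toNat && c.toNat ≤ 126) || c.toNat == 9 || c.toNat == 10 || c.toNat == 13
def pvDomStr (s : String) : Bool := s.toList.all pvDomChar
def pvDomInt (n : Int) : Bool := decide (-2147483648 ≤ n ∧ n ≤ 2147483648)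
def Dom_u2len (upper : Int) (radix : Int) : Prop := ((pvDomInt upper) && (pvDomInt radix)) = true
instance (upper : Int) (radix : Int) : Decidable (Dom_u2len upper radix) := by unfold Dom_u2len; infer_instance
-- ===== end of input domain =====

-- B replaces A's divide-down loop on upper-1 by a grow-a-power loop (p=1; while p<upper: p*=radix); same count, no subtraction, no division.

-- ===== PORT A =====
-- A's while loop: u //= radix; i += 1 while u ≠ 0.  Under Pre_ (upper ≥ 1, radix ≥ 2)
-- u stays ≥ 0, so the termination guards 0 < u / 2 ≤ radix coincide with Python's 'while u'.
def u2lenLoop (radix : Int) (u : Int) (i : Int) : Int :=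
  if h : 2 ≤ radix ∧ 0 < u then
    u2lenLoop radix (PySem.Int.floordiv u radix) (i + 1)
  else i
termination_by u.toNat
decreasing_by
  have hr : (0:Int) < radix := by omega
  have h1 : PySem.Int.floordiv u radix < u :=
    (PySem.Int.floordiv_lt_iff_lt_mul hr).mpr (by nlinarith)
  have h2 : (0:Int) ≤ PySem.Int.floordiv u radix := by
    rw [PySem.Int.floordiv_eq_ediv_of_pos hr]; exact Int.ediv_nonneg (by omega) (by omega)
  omega

def u2len (upper : Int) (radix : Int) : Int :=
  u2lenLoop radix (upper - 1) 0

-- ===== PORT B =====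
-- B's while loop: p *= radix; i += 1 while p < upper.  Under Pre_ the guards 2 ≤ radix,
-- 0 < p are invariant, so the loop condition coincides with Python's 'while p < upper'.
def u2lenAltLoop (upper : Int) (radix : Int) (p : Int) (i : Int) : Int :=
  if h : 2 ≤ radix ∧ 0 < p ∧ p < upper then
    u2lenAltLoop upper radix (p * radix) (i + 1)
  else i
termination_by (upper - p).toNat
decreasing_by
  have : p * 2 ≤ p * radix := by
    exact mul_le_mul_of_nonneg_left h.1 (le_of_lt h.2.1)
  omega

def u2len_alt (upper : Int) (radix : Int) : Int :=
  u2lenAltLoop upper radix 1 0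

-- ===== PRECONDITION & SPEC =====
-- Pre_ excludes exactly the inputs on which A's asserts raise AssertionError.
def Pre_u2len (upper : Int) (radix : Int) : Prop := 1 ≤ upper ∧ 2 ≤ radix
instance (upper : Int) (radix : Int) : Decidable (Pre_u2len upper radix) := by unfold Pre_u2len; infer_instance
def pvWitness_u2len : Int × Int := (10, 3)

def Spec_u2len (upper : Int) (radix : Int) (out : Int) : Prop := out = u2len_alt upper radix
instance (upper : Int) (radix : Int) (out : Int) : Decidable (Spec_u2len upper radix out) := by unfold Spec_u2len; infer_instance

-- ===== CLAIM (what is proved, stated in full; the proofs are below) =====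
def Claim_equal_u2len : Prop := ∀ (upper : Int) (radix : Int), Dom_u2len upper radix → Pre_u2len upper radix → Spec_u2len upper radix (u2len upper radix)

-- ===== LEMMAS AND PROOFS =====

-- Bridge: after k steps of B's loop the remaining work equals A's loop started at ⌊(upper-1)/p⌋.
theorem bridge (radix : Int) (h2 : 2 ≤ radix) (upper : Int) (h1 : 1 ≤ upper) :
    ∀ (n : Nat) (p i : Int), (upper - p).toNat ≤ n → 0 < p →
      u2lenAltLoop upper radix p i = u2lenLoop radix (PySem.Int.floordiv (upper - 1) p) i := by
  intro n
  induction n with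
  | zero =>
    intro p i hn hp
    -- upper ≤ p, so both loops stop immediately
    have hle : upper ≤ p := by omega
    rw [u2lenAltLoop, u2lenLoop]
    have hdiv : PySem.Int.floordiv (upper - 1) p = 0 := by
      rw [PySem.Int.floordiv_eq_ediv_of_pos hp]
      exact Int.ediv_eq_zero_of_lt (by omega) (by omega)
    rw [hdiv]
    simp [hle]
  | succ n ih =>
    intro p i hn hp
    by_cases hlt : p < upper
    · -- both loops take a step
      have hdivpos : 1 ≤ PySem.Int.floordiv (upper - 1) p := by
        rw [PySem.Int.floordiv_eq_ediv_of_pos hp]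
        exact Int.le_ediv_iff_mul_le hp |>.mpr (by omega)
      rw [u2lenAltLoop, u2lenLoop]
      simp only [h2, hp, hlt, and_true, dif_pos, show (0 : Int) < PySem.Int.floordiv (upper - 1) p by omega]
      have hcomp : PySem.Int.floordiv (PySem.Int.floordiv (upper - 1) p) radix
          = PySem.Int.floordiv (upper - 1) (p * radix) := by
        rw [PySem.Int.floordiv_eq_ediv_of_pos hp,
            PySem.Int.floordiv_eq_ediv_of_pos (show (0:Int) < radix by omega),
            PySem.Int.floordiv_eq_ediv_of_pos (show (0:Int) < p * radix by positivity)]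
        exact Int.ediv_ediv_of_nonneg (le_of_lt hp)
      rw [hcomp]
      have hstep : (upper - p * radix).toNat ≤ n := by
        have : p * 2 ≤ p * radix := mul_le_mul_of_nonneg_left h2 (le_of_lt hp)
        omega
      exact ih (p * radix) (i + 1) hstep (by positivity)
    · -- both loops stop
      have hle : upper ≤ p := by omega
      rw [u2lenAltLoop, u2lenLoop]
      have hdiv : PySem.Int.floordiv (upper - 1) p = 0 := by
        rw [PySem.Int.floordiv_eq_ediv_of_pos hp]
        exact Int.ediv_eq_zero_of_lt (by omega) (by omega)
      rw [hdiv]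
      simp [hlt]

-- ===== VERDICT (by name: the statement is the Claim_ definition above) =====
theorem u2len_spec : Claim_equal_u2len := by
  intro upper radix _ hpre
  unfold Spec_u2len u2len u2len_alt
  have := bridge radix hpre.2 upper hpre.1 (upper - 1).toNat 1 0 (by omega) (by omega)
  rw [this, PySem.Int.floordiv_eq_ediv_of_pos (by omega : (0:Int) < 1), Int.ediv_one]
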